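-- pv_equiv track=rewrite | github.com/Penitto/go_documentation | go_template/generator.py | _mask_quoted_string
-- ===== SOURCE A (Python) =====
-- from typing import Callable, Dict, Iterable, List, Optional, Tuple
--
-- def _mask_quoted_string(chars: List[str], source: str, start: int, quote: str) -> int:
--     i = start + 1
--     length = len(source)
--     while i < length:
--         ch = source[i]
--         chars[i] = " "
--         if ch == "\\":
--             if i + 1 < length:
--                 chars[i + 1] = " "
--             i += 2
--             continue
--         if ch == quote:
--             return i + 1
--         i += 1
--     return length
-- ===== SOURCE B (Python) =====
-- from typing import List
--
-- def _mask_quoted_string(chars: List[str], source: str, start: int, quote: str) -> int: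
--     # Different algorithm: collect the positions of the interesting characters
--     # (backslash or the quote) once, resolve escapes by threshold-jumping over
--     # that position list, then mask the whole decided span in one sweep.
--     i0 = start + 1
--     n = len(source)
--     specials = [j for j in range(i0, n) if source[j] == "\\" or source[j] == quote]
--     end = n
--     limit = i0
--     for j in specials:
--         if j < limit:
--             continue  # consumed as an escaped character
--         if source[j] == "\\":
--             limit = j + 2
--         else:
--             end = j + 1
--             break
--     for k in range(i0, end):
--         chars[k] = " "
--     return end
-- ===== Notes on version B (the rewrite author's own statement) =====
-- stated objective: alternative
-- what changed: Replaces A's stateful character-by-character scan (variable stride, early return) with a staged algorithm: first collect the positions of all backslash/quote characters in one comprehension, then resolve escapes by threshold-jumping over that sparse position list to find the terminator, then mask the whole decided span in one sweep.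
-- outside the precondition, e.g. on _mask_quoted_string(['x', 'y'], 'a"c', -1, '"'): A returns 2, B returns 2
import Mathlib
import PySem

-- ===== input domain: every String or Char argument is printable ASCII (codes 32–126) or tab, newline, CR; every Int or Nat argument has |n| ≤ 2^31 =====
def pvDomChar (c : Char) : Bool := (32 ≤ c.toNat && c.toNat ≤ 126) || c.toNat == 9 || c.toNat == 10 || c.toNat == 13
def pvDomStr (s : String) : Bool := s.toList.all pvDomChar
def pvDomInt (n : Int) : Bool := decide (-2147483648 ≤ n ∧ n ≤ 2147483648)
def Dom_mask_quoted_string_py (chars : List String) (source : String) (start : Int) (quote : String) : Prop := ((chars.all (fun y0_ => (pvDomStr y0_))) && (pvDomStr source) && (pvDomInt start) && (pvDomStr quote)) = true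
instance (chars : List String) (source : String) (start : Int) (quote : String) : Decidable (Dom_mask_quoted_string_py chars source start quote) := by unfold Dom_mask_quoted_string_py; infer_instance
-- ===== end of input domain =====

-- B replaces A's stateful per-character scan with a staged algorithm: collect the positions of
-- backslash/quote characters once, resolve escapes by threshold-jumping over that position list,
-- then mask the decided span in one sweep (objective: alternative, same cost). Both Pythons
-- perform the same in-place masking of `chars`; the equivalence proved here is about the
-- RETURN value only.

-- ===== PORT A =====
-- A's while-loop: variable stride (i+2 on backslash, i+1 otherwise), early return at the quote.
-- The chars[...] = " " writes do not affect the return value and Pre_ rules out the inputs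
-- where they (or source[i]) would raise, so the port carries only the scan state.
def maskA_loop (src : List Char) (qt : List Char) (i : Int) : Int :=
  if _h : i < (src.length : Int) then
    match PySem.List.pyGet? src i with
    | none => 0  -- unreachable under Pre_ (Python raises IndexError here)
    | some ch =>
      if ch = '\\' then maskA_loop src qt (i + 2)
      else if [ch] = qt then i + 1
      else maskA_loop src qt (i + 1)
  else (src.length : Int)
termination_by ((src.length : Int) - i).toNat
decreasing_by all_goals omega

def mask_quoted_string_py (chars : List String) (source : String) (start : Int) (quote : String) : Int :=
  maskA_loop source.toList quote.toList (start + 1)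

-- ===== PORT B =====
-- B stage 1: the comprehension [j for j in range(i0, n) if source[j] == "\\" or source[j] == quote].
def maskB_specials (src : List Char) (qt : List Char) (i0 n : Int) : List Int :=
  (PySem.List.pyRange i0 n 1).filter (fun j =>
    match PySem.List.pyGet? src j with
    | some ch => decide (ch = '\\') || decide ([ch] = qt)
    | none => false)  -- unreachable under Pre_ (Python raises IndexError here)

-- B stage 2: the for-loop over `specials` with `limit`/`end` and break.
def maskB_walk (src : List Char) (qt : List Char) : List Int → Int → Int → Int
  | [], _, dflt => dflt
  | j :: rest, limit, dflt =>
    if j < limit then maskB_walk src qt rest limit dflt  -- consumed as escaped: continue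
    else match PySem.List.pyGet? src j with
      | some ch =>
        if ch = '\\' then maskB_walk src qt rest (j + 2) dflt
        else j + 1  -- end = j + 1; break
      | none => 0  -- unreachable under Pre_

-- Stage 3 (the masking sweep) mutates `chars` only; return value is `end`.
def mask_quoted_string_py_alt (chars : List String) (source : String) (start : Int) (quote : String) : Int :=
  maskB_walk source.toList quote.toList
    (maskB_specials source.toList quote.toList (start + 1) (source.toList.length : Int))
    (start + 1) (source.toList.length : Int)

-- ===== PRECONDITION & SPEC =====
-- Pre_ excludes inputs where the scan raises IndexError in Python: reading source at an index
-- below -len(source), or writing past the bounds of `chars` when chars is shorter than source.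
-- The chars-length bound is sufficient and slightly conservative: on a few excluded inputs the
-- quote is found before the write leaves chars' range and A still returns (see the cite).
def Pre_mask_quoted_string_py (chars : List String) (source : String) (start : Int) (quote : String) : Prop :=
  (source.toList.length : Int) ≤ start + 1 ∨
  (source.toList.length ≤ chars.length ∧ -(source.toList.length : Int) ≤ start + 1)
instance (chars : List String) (source : String) (start : Int) (quote : String) : Decidable (Pre_mask_quoted_string_py chars source start quote) := by unfold Pre_mask_quoted_string_py; infer_instance

def pvWitness_mask_quoted_string_py : List String × String × Int × String := (["x", "y"], "x\"", 0, "\"")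

def Spec_mask_quoted_string_py (chars : List String) (source : String) (start : Int) (quote : String) (out : Int) : Prop := out = mask_quoted_string_py_alt chars source start quote
instance (chars : List String) (source : String) (start : Int) (quote : String) (out : Int) : Decidable (Spec_mask_quoted_string_py chars source start quote out) := by unfold Spec_mask_quoted_string_py; infer_instance

-- ===== CLAIM (what is proved, stated in full; the proofs are below) =====
def Claim_equal_mask_quoted_string_py : Prop := ∀ (chars : List String) (source : String) (start : Int) (quote : String), Dom_mask_quoted_string_py chars source start quote → Pre_mask_quoted_string_py chars source start quote → Spec_mask_quoted_string_py chars source start quote (mask_quoted_string_py chars source start quote)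

-- ===== LEMMAS AND PROOFS =====

-- In-range indices always yield a character.
theorem pyGet?_isSome_of_range {src : List Char} {i : Int}
    (hlo : -(src.length : Int) ≤ i) (hhi : i < (src.length : Int)) :
    ∃ ch, PySem.List.pyGet? src i = some ch := by
  rcases h : PySem.List.pyGet? src i with _ | ch
  · exfalso
    simp only [PySem.List.pyGet?, PySem.List.pyIdx?] at h
    split_ifs at h with h1 h2 <;> simp_all <;> omega
  · exact ⟨ch, rfl⟩

-- The walk only looks at `limit` through the skip test of each element.
theorem walk_limit_congr (src qt : List Char) (l : List Int) (limit limit' dflt : Int)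
    (h : ∀ j ∈ l, (j < limit ↔ j < limit')) :
    maskB_walk src qt l limit dflt = maskB_walk src qt l limit' dflt := by
  induction l with
  | nil => rfl
  | cons j rest ih =>
    have hj := h j (by simp)
    by_cases hlt : j < limit
    · rw [maskB_walk, maskB_walk, if_pos hlt, if_pos (hj.mp hlt)]
      exact ih (fun k hk => h k (by simp [hk]))
    · rw [maskB_walk, maskB_walk, if_neg hlt, if_neg (fun c => hlt (hj.mpr c))]

-- Core invariant: from any in-range position i, A's scan equals B's walk over the
-- special positions at or after i, with limit = i.
theorem loop_eq_walk (src qt : List Char) (i : Int) (hlo : -(src.length : Int) ≤ i) :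
    maskA_loop src qt i =
      maskB_walk src qt (maskB_specials src qt i (src.length : Int)) i (src.length : Int) := by
  by_cases hlt : i < (src.length : Int)
  · obtain ⟨ch, hch⟩ := pyGet?_isSome_of_range hlo hlt
    rw [maskA_loop, dif_pos hlt, hch]
    dsimp only
    unfold maskB_specials
    rw [PySem.List.pyRange_one_cons hlt, List.filter_cons]
    by_cases hsp : (ch = '\\' ∨ [ch] = qt)
    · -- i is a special position: head of the list, processed with limit = i.
      have hc : (match PySem.List.pyGet? src i with
          | some ch => decide (ch = '\\') || decide ([ch] = qt)
          | none => false) = true := by rw [hch]; simpa using hsp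
      rw [if_pos hc, maskB_walk, if_neg (by omega : ¬ i < i), hch]
      dsimp only
      by_cases hbs : ch = '\\'
      · rw [if_pos hbs, if_pos hbs]
        -- A jumps to i+2; B's walk skips a possible special at i+1 (it is < limit = i+2).
        by_cases h1 : i + 1 < (src.length : Int)
        · rw [PySem.List.pyRange_one_cons h1, List.filter_cons,
              show i + 1 + 1 = i + 2 by ring]
          have tail := loop_eq_walk src qt (i + 2) (by omega)
          unfold maskB_specials at tail
          split_ifs with hK
          · rw [maskB_walk, if_pos (by omega : i + 1 < i + 2)]
            exact tail
          · exact tail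
        · rw [PySem.List.pyRange_one_eq_nil (by omega)]
          rw [maskA_loop, dif_neg (by omega : ¬ (i + 2 < (src.length : Int)))]
          rfl
      · have hq : [ch] = qt := by tauto
        rw [if_neg hbs, if_neg hbs, if_pos hq]
    · -- i is ordinary: filtered out; the walk's limit i behaves like i+1 on positions ≥ i+1.
      have hc : ¬ ((match PySem.List.pyGet? src i with
          | some ch => decide (ch = '\\') || decide ([ch] = qt)
          | none => false) = true) := by rw [hch]; simpa using hsp
      rw [if_neg hc]
      have hbs : ¬ ch = '\\' := fun c => hsp (Or.inl c)
      have hq : ¬ [ch] = qt := fun c => hsp (Or.inr c)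
      rw [if_neg hbs, if_neg hq]
      rw [walk_limit_congr src qt _ i (i + 1) _ (fun j hj => by
        have hm := List.mem_of_mem_filter hj
        have := (PySem.List.mem_pyRange_one).mp hm
        constructor <;> intro <;> omega)]
      exact loop_eq_walk src qt (i + 1) (by omega)
  · rw [maskA_loop, dif_neg hlt]
    unfold maskB_specials
    rw [PySem.List.pyRange_one_eq_nil (by omega)]
    rfl
termination_by ((src.length : Int) - i).toNat
decreasing_by all_goals omega

-- ===== VERDICT (by name: the statement is the Claim_ definition above) =====
theorem mask_quoted_string_py_spec : Claim_equal_mask_quoted_string_py := by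
  intro chars source start quote _hDom hPre
  show mask_quoted_string_py chars source start quote = mask_quoted_string_py_alt chars source start quote
  unfold mask_quoted_string_py mask_quoted_string_py_alt
  rcases hPre with h | ⟨_, h⟩
  · rw [maskA_loop, dif_neg (by omega : ¬ (start + 1 < ((source.toList.length : Nat) : Int)))]
    unfold maskB_specials
    rw [PySem.List.pyRange_one_eq_nil (by omega)]
    rfl
  · exact loop_eq_walk _ _ _ h
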